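-- pv_equiv track=rewrite | github.com/axlan/roll20-chatlog-stats | dashboard.py | count_streak
-- ===== SOURCE A (Python) =====
-- def count_streak(vals):
--     max_streak = 0
--     current_streak = 0
--     for val in vals:
--         if val:
--             current_streak += 1
--             if current_streak > max_streak:
--                 max_streak = current_streak
--         else:
--             current_streak = 0
--     return max_streak
-- ===== SOURCE B (Python) =====
-- from itertools import groupby
--
-- def count_streak(vals):
--     return max((sum(1 for _ in g) for k, g in groupby(vals, key=bool) if k),
--                default=0)
-- ===== Notes on version B (the rewrite author's own statement) =====
-- stated objective: idiomatic
-- what changed: Replaced the manual reset-and-track counter loop by itertools.groupby partitioning the list into maximal runs of equal truthiness and taking the max length over the truthy runs.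
import Mathlib
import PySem

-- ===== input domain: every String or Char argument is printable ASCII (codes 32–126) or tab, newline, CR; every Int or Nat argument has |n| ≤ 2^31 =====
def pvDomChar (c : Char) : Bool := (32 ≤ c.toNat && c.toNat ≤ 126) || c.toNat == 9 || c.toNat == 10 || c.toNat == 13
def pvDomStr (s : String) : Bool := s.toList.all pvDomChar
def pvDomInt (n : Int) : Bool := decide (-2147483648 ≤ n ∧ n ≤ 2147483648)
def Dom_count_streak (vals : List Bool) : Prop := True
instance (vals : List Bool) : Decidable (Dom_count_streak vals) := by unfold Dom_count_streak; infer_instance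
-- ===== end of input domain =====

-- B replaces A's reset-and-track counter loop by grouping the list into maximal runs
-- of equal truthiness (itertools.groupby) and taking the max truthy run length (idiomatic).

-- ===== PORT A =====
-- A's loop carries (max_streak, current_streak); the loop body is the helper stepA.
def stepA (st : Int × Int) (val : Bool) : Int × Int :=
  if val then
    let cur := st.2 + 1
    (if cur > st.1 then cur else st.1, cur)
  else
    (st.1, 0)

def count_streak (vals : List Bool) : Int :=
  (vals.foldl stepA (0, 0)).1

-- ===== PORT B =====
-- groupby(vals, key=bool): maximal runs of equal value, as (value, run length) pairs.
def groupRuns : List Bool → List (Bool × Int)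
  | [] => []
  | v :: rest =>
      let run := rest.takeWhile (· == v)
      let rest' := rest.dropWhile (· == v)
      (v, 1 + (run.length : Int)) :: groupRuns rest'
termination_by l => l.length
decreasing_by
  exact Nat.lt_succ_of_le (List.length_dropWhile_le _ _)

-- max((len of g for k, g in groupby(...) if k), default=0)
def count_streak_alt (vals : List Bool) : Int :=
  ((groupRuns vals).filterMap (fun kn => if kn.1 then some kn.2 else none)).foldl max 0

-- ===== PRECONDITION & SPEC =====
def Spec_count_streak (vals : List Bool) (out : Int) : Prop := out = count_streak_alt vals
instance (vals : List Bool) (out : Int) : Decidable (Spec_count_streak vals out) := by unfold Spec_count_streak; infer_instance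

-- ===== CLAIM (what is proved, stated in full; the proofs are below) =====
def Claim_equal_count_streak : Prop := ∀ (vals : List Bool), Dom_count_streak vals → Spec_count_streak vals (count_streak vals)

-- ===== LEMMAS AND PROOFS =====

-- N c l: the longest truthy streak of l when the current run already has length c.
def N (c : Int) : List Bool → Int
  | [] => c
  | true :: t => N (c + 1) t
  | false :: t => max c (N 0 t)

lemma N_ge (c : Int) (l : List Bool) : c ≤ N c l := by
  induction l generalizing c with
  | nil => exact le_of_eq rfl
  | cons v t ih =>
      cases v
      · exact le_max_left c (N 0 t)
      · exact le_trans (by omega) (ih (c + 1))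

-- A's fold equals max m (N c l) under the loop invariant c ≤ m.
lemma foldA (l : List Bool) : ∀ (m c : Int), 0 ≤ c → c ≤ m →
    (l.foldl stepA (m, c)).1 = max m (N c l) := by
  induction l with
  | nil => intro m c _ h; simp only [List.foldl_nil, N]; exact (max_eq_left h).symm
  | cons v t ih =>
      intro m c h0 h
      cases v
      · rw [List.foldl_cons, show stepA (m, c) false = (m, 0) from rfl,
            ih m 0 le_rfl (by omega)]
        simp only [N]
        rw [← max_assoc, max_eq_left h]
      · rw [List.foldl_cons]
        have hN : c + 1 ≤ N (c + 1) t := N_ge _ _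
        have hstep : stepA (m, c) true = (max m (c + 1), c + 1) := by
          unfold stepA
          split_ifs <;> simp_all <;> omega
        rw [hstep, ih (max m (c + 1)) (c + 1) (by omega) (le_max_right _ _)]
        simp only [N]
        rw [max_assoc, max_eq_right hN]

lemma foldl_max_max (l : List Int) : ∀ (a b : Int),
    l.foldl max (max a b) = max a (l.foldl max b) := by
  induction l with
  | nil => intro a b; rfl
  | cons x t ih =>
      intro a b
      simp only [List.foldl_cons, max_assoc, ih]

-- N absorbs an all-true run as a counter increment.
lemma N_true_run (run : List Bool) (h : ∀ x ∈ run, x = true) :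
    ∀ (c : Int) (rest : List Bool),
    N c (run ++ rest) = N (c + run.length) rest := by
  induction run with
  | nil => intro c rest; simp
  | cons x t ih =>
      intro c rest
      have hx : x = true := h x (List.mem_cons_self ..)
      subst hx
      have := ih (fun y hy => h y (List.mem_cons_of_mem _ hy)) (c + 1) rest
      simp only [List.cons_append, N, this]
      congr 1
      simp only [List.length_cons]
      push_cast
      omega

-- N 0 ignores an all-false run.
lemma N_false_run (run : List Bool) (h : ∀ x ∈ run, x = false) (rest : List Bool) :
    N 0 (run ++ rest) = N 0 rest := by
  induction run with
  | nil => simp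
  | cons x t ih =>
      have hx : x = false := h x (List.mem_cons_self ..)
      subst hx
      have h' := ih (fun y hy => h y (List.mem_cons_of_mem _ hy))
      simp only [List.cons_append, N, h']
      exact max_eq_right (le_trans le_rfl (N_ge 0 rest))

lemma mem_takeWhile_eq {v : Bool} {l : List Bool} :
    ∀ x ∈ l.takeWhile (· == v), x = v := by
  intro x hx
  have := List.mem_takeWhile_imp hx
  simpa using this

lemma dropWhile_head_ne {v : Bool} {l t : List Bool} {x : Bool}
    (h : l.dropWhile (· == v) = x :: t) : x ≠ v := by
  intro hxv
  have := List.head?_dropWhile_not (· == v) l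
  rw [h] at this
  simp [hxv] at this

-- filterMap keeps truthy groups' lengths and drops falsy groups.
lemma lens_cons_false (k : Int) (gs : List (Bool × Int)) :
    ((false, k) :: gs).filterMap (fun kn => if kn.1 then some kn.2 else none)
      = gs.filterMap (fun kn => if kn.1 then some kn.2 else none) := by simp

lemma lens_cons_true (k : Int) (gs : List (Bool × Int)) :
    ((true, k) :: gs).filterMap (fun kn => if kn.1 then some kn.2 else none)
      = k :: gs.filterMap (fun kn => if kn.1 then some kn.2 else none) := by simp

-- main bridge: B's grouped maximum equals N 0.
lemma groups_eq_N : ∀ (n : ℕ) (l : List Bool), l.length ≤ n →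
    ((groupRuns l).filterMap (fun kn => if kn.1 then some kn.2 else none)).foldl max 0
      = N 0 l := by
  intro n
  induction n with
  | zero =>
      intro l hl
      have : l = [] := List.eq_nil_of_length_eq_zero (Nat.le_zero.mp hl)
      subst this
      rw [groupRuns]
      rfl
  | succ n ih =>
      intro l hl
      match l with
      | [] => rw [groupRuns]; rfl
      | v :: t =>
          have hlen : (t.dropWhile (· == v)).length ≤ n := by
            have := List.length_dropWhile_le (· == v) t
            simp only [List.length_cons] at hl
            omega
          cases v
          · -- false group: dropped by filterMap; N 0 skips the false run
            rw [groupRuns, lens_cons_false, ih _ hlen]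
            have h2 := N_false_run (t.takeWhile (· == false)) mem_takeWhile_eq
              (t.dropWhile (· == false))
            rw [List.takeWhile_append_dropWhile] at h2
            rw [← h2]
            simp only [N]
            exact (max_eq_right (N_ge 0 t)).symm
          · -- true group: contributes 1 + run.length
            rw [groupRuns, lens_cons_true, List.foldl_cons]
            have hkpos : (0 : Int) ≤ 1 + ((t.takeWhile (· == true)).length : Int) := by
              positivity
            rw [max_eq_right hkpos,
              show (1 + ((t.takeWhile (· == true)).length : Int))
                  = max (1 + ((t.takeWhile (· == true)).length : Int)) 0 from
                (max_eq_left hkpos).symm,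
              foldl_max_max, ih _ hlen]
            have htd := N_true_run (t.takeWhile (· == true)) mem_takeWhile_eq 1
              (t.dropWhile (· == true))
            rw [List.takeWhile_append_dropWhile] at htd
            have hrhs : N 0 (true :: t)
                = N (1 + ((t.takeWhile (· == true)).length : Int)) (t.dropWhile (· == true)) := by
              simp only [N, zero_add]
              exact htd
            rw [hrhs]
            match hd : t.dropWhile (· == true) with
            | [] =>
                simp only [N]
                exact max_eq_left hkpos
            | x :: t2 =>
                have hx : x = false := by
                  have := dropWhile_head_ne (l := t) (v := true) hd
                  simp at this
                  exact this
                subst hx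
                simp only [N]
                rw [max_eq_right (N_ge 0 t2)]

-- ===== VERDICT (by name: the statement is the Claim_ definition above) =====
theorem count_streak_spec : Claim_equal_count_streak := by
  intro vals _
  unfold Spec_count_streak count_streak count_streak_alt
  rw [foldA vals 0 0 le_rfl le_rfl, groups_eq_N vals.length vals le_rfl]
  exact max_eq_right (N_ge 0 vals)
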